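-- pv_equiv track=rewrite | github.com/kranti-up/clemcore | games/minecraft/utils/minecraftdata.py | get_context_action
-- ===== SOURCE A (Python) =====
-- def get_context_action(dialog):
--     dialogue_context_action = []
--     action = []
--     context = []
--     for d in dialog:
--         if(d[0] != '['):
--             if action:
--                 dialogue_context_action.append((context, action))
--                 context = []
--                 action = []
--             context.append(d)
--         else:
--             action.append(d)
--     if context or action:
--         dialogue_context_action.append((context, action))
--
--     return dialogue_context_action
-- ===== SOURCE B (Python) =====
-- def get_context_action(dialog):
--     pairs = []
--     i = 0
--     n = len(dialog)
--     while i < n: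
--         j = i
--         while j < n and not dialog[j].startswith('['):
--             j += 1
--         k = j
--         while k < n and dialog[k].startswith('['):
--             k += 1
--         pairs.append((dialog[i:j], dialog[j:k]))
--         i = k
--     return pairs
-- ===== Notes on version B (the rewrite author's own statement) =====
-- stated objective: alternative
-- what changed: Replaces A's stateful accumulator loop (pending context/action lists with flush-on-transition and a trailing flush) by a segment scanner that repeatedly takes a maximal run of context messages followed by a maximal run of action messages and emits each pair directly.
-- crash fix: A raises IndexError (d[0]) whenever the dialog contains an empty string; B uses startswith and returns normally, treating the empty string as a context message. — e.g. on get_context_action([""]): A raises IndexError, B returns [([""], [])]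
import Mathlib
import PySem

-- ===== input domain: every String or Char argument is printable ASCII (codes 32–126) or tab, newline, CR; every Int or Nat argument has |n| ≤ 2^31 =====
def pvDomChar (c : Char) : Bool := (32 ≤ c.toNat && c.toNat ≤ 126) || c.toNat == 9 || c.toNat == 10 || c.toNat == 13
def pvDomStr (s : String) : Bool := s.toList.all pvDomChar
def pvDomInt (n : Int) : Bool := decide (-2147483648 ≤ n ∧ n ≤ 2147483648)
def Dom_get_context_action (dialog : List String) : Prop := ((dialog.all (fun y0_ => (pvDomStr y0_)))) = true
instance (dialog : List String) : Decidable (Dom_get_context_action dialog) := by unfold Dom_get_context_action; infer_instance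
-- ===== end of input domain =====

-- B replaces A's stateful flush-on-transition accumulator loop by a direct scanner over
-- maximal context-run / action-run segments; same O(n) cost, different decomposition.

-- ===== PORT A =====
-- A's for-loop over dialog with state (result so far, context, action); the final
-- 'if context or action' flush is the base case.  'd[0] != "["' is
-- PySem.Str.pyGet? d 0 ≠ some '[' (none, i.e. IndexError on d = "", lies outside Pre_).
def pvALoop (dialog : List String) (acc : List (List String × List String))
    (context action : List String) : List (List String × List String) :=
  match dialog with
  | [] => if context ≠ [] ∨ action ≠ [] then acc ++ [(context, action)] else acc
  | d :: ds =>
    if PySem.Str.pyGet? d 0 ≠ some '[' then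
      if action ≠ [] then pvALoop ds (acc ++ [(context, action)]) [d] []
      else pvALoop ds acc (context ++ [d]) action
    else pvALoop ds acc context (action ++ [d])

def get_context_action (dialog : List String) : List (List String × List String) :=
  pvALoop dialog [] [] []

-- ===== PORT B =====
-- Source B's outer while loop on the remaining suffix: the inner 'while not startswith' /
-- 'while startswith' index scans and the slices dialog[i:j], dialog[j:k] are the
-- takeWhile/dropWhile of the suffix.
def pvIsAct (d : String) : Bool := PySem.Str.startswith d "["

def pvBGo (l : List String) : List (List String × List String) :=
  match l with
  | [] => []
  | d :: ds =>
    let ctx := (d :: ds).takeWhile (fun x => !pvIsAct x)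
    let rest := (d :: ds).dropWhile (fun x => !pvIsAct x)
    let act := rest.takeWhile pvIsAct
    let rest2 := rest.dropWhile pvIsAct
    (ctx, act) :: pvBGo rest2
  termination_by l.length
  decreasing_by
    by_cases h : pvIsAct d
    · have h1 : (d :: ds).dropWhile (fun x => !pvIsAct x) = d :: ds := by
        simp [List.dropWhile, h]
      rw [h1]
      have h3 := List.length_dropWhile_le (p := pvIsAct) ds
      simp [List.dropWhile, h]; omega
    · have h1 : (d :: ds).dropWhile (fun x => !pvIsAct x) = ds.dropWhile (fun x => !pvIsAct x) := by
        simp [List.dropWhile, h]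
      rw [h1]
      have h2 := List.length_dropWhile_le (p := fun x => !pvIsAct x) ds
      have h3 := List.length_dropWhile_le (p := pvIsAct) (ds.dropWhile (fun x => !pvIsAct x))
      simp at h2 h3 ⊢; omega

def get_context_action_alt (dialog : List String) : List (List String × List String) :=
  pvBGo dialog

-- ===== PRECONDITION & SPEC =====
-- Pre_ excludes exactly the dialogs containing an empty string, on which Python A raises
-- IndexError at d[0].
def Pre_get_context_action (dialog : List String) : Prop := "" ∉ dialog
instance (dialog : List String) : Decidable (Pre_get_context_action dialog) := by
  unfold Pre_get_context_action; infer_instance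

def pvWitness_get_context_action : List String := ["hello", "[pick red]", "[place 1]", "ok"]

-- A raises IndexError on any dialog containing the empty string; B returns normally there,
-- treating "" as a context message.
def Raises_get_context_action (dialog : List String) : Prop := "" ∈ dialog
instance (dialog : List String) : Decidable (Raises_get_context_action dialog) := by
  unfold Raises_get_context_action; infer_instance
def pvRaiseWitness_get_context_action : List String := [""]
def pvRaiseWitnessOut_get_context_action : List (List String × List String) := [([""], [])]

def Spec_get_context_action (dialog : List String) (out : List (List String × List String)) : Prop :=
  out = get_context_action_alt dialog
instance (dialog : List String) (out : List (List String × List String)) :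
    Decidable (Spec_get_context_action dialog out) := by
  unfold Spec_get_context_action; infer_instance

-- ===== CLAIM (what is proved, stated in full; the proofs are below) =====
def Claim_equal_get_context_action : Prop := ∀ (dialog : List String),
  Dom_get_context_action dialog → Pre_get_context_action dialog →
  Spec_get_context_action dialog (get_context_action dialog)

def Claim_raises_get_context_action : Prop :=
  (∀ (dialog : List String), Dom_get_context_action dialog →
     Raises_get_context_action dialog → ¬ Pre_get_context_action dialog) ∧
  (Dom_get_context_action (pvRaiseWitness_get_context_action) ∧
   Raises_get_context_action (pvRaiseWitness_get_context_action) ∧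
   get_context_action_alt (pvRaiseWitness_get_context_action) = pvRaiseWitnessOut_get_context_action)

-- ===== LEMMAS AND PROOFS =====

-- A's branch condition coincides with ¬(d startswith "[") on every string (even "").
theorem pvCond_eq (d : String) :
    (PySem.Str.pyGet? d 0 ≠ some '[') ↔ pvIsAct d = false := by
  rw [pvIsAct, PySem.Str.startswith_eq, ← Bool.not_eq_true, PySem.Chars.startswith_iff]
  have h0 : PySem.Str.pyGet? d 0 = PySem.List.pyGet? d.toList 0 := by simp
  rw [h0]
  cases h : d.toList with
  | nil => simp [PySem.List.pyGet?]
  | cons c cs =>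
    rw [PySem.List.pyGet?_zero_cons]
    have h1 : ("[" : String).toList = ['['] := rfl
    rw [h1]
    simp [List.cons_prefix_cons, eq_comm]

-- the 'pending context' prepended to B's first pair, for the loop invariant
def pvMerge (context : List String) (ps : List (List String × List String)) :
    List (List String × List String) :=
  match ps with
  | [] => if context = [] then [] else [(context, [])]
  | (c, a) :: r => (context ++ c, a) :: r

theorem pvMerge_nil (ps : List (List String × List String)) : pvMerge [] ps = ps := by
  cases ps with
  | nil => simp [pvMerge]
  | cons p r => cases p; simp [pvMerge]

theorem pvBGo_cons_act (d : String) (ds : List String) (hd : pvIsAct d = true) :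
    pvBGo (d :: ds) = ([], d :: ds.takeWhile pvIsAct) :: pvBGo (ds.dropWhile pvIsAct) := by
  rw [pvBGo]
  simp [hd]

theorem pvBGo_cons_ctx (d : String) (ds : List String) (hd : pvIsAct d = false) :
    pvBGo (d :: ds) =
      (d :: ds.takeWhile (fun x => !pvIsAct x),
       (ds.dropWhile (fun x => !pvIsAct x)).takeWhile pvIsAct) ::
      pvBGo ((ds.dropWhile (fun x => !pvIsAct x)).dropWhile pvIsAct) := by
  rw [pvBGo]
  simp [hd]

theorem pvMerge_cons (d : String) (ds context : List String) (hd : pvIsAct d = false) :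
    pvMerge (context ++ [d]) (pvBGo ds) = pvMerge context (pvBGo (d :: ds)) := by
  rw [pvBGo_cons_ctx d ds hd]
  cases ds with
  | nil => simp [pvBGo, pvMerge]
  | cons e es =>
    rw [pvBGo]
    simp [pvMerge, List.append_assoc]

theorem pvMain (l : List String) :
    (∀ acc context, pvALoop l acc context [] = acc ++ pvMerge context (pvBGo l)) ∧
    (∀ acc context action, action ≠ [] →
      pvALoop l acc context action =
        acc ++ (context, action ++ l.takeWhile pvIsAct) :: pvBGo (l.dropWhile pvIsAct)) := by
  induction l with
  | nil =>
    constructor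
    · intro acc context
      by_cases hc : context = []
      · simp [pvALoop, pvBGo, pvMerge, hc]
      · simp [pvALoop, pvBGo, pvMerge, hc]
    · intro acc context action ha
      simp [pvALoop, pvBGo, ha]
  | cons d ds ih =>
    constructor
    · intro acc context
      by_cases hd : pvIsAct d
      · rw [pvALoop, if_neg (by rw [pvCond_eq]; simp [hd])]
        rw [show ([] : List String) ++ [d] = [d] from rfl]
        rw [ih.2 acc context [d] (by simp)]
        rw [pvBGo_cons_act d ds hd]
        simp [pvMerge]
      · rw [pvALoop, if_pos (by rw [pvCond_eq]; simp [hd]), if_neg (by simp)]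
        rw [ih.1 acc (context ++ [d])]
        rw [pvMerge_cons d ds context (by simp [hd])]
    · intro acc context action ha
      by_cases hd : pvIsAct d
      · rw [pvALoop, if_neg (by rw [pvCond_eq]; simp [hd])]
        rw [ih.2 acc context (action ++ [d]) (by simp)]
        simp [hd, List.append_assoc]
      · rw [pvALoop, if_pos (by rw [pvCond_eq]; simp [hd]), if_pos ha]
        rw [ih.1 (acc ++ [(context, action)]) [d]]
        rw [show ([d] : List String) = [] ++ [d] from rfl,
            pvMerge_cons d ds [] (by simp [hd]), pvMerge_nil]
        simp [hd]

-- ===== VERDICT (by name: the statement is the Claim_ definition above) =====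
theorem get_context_action_spec : Claim_equal_get_context_action := by
  intro dialog _ _
  unfold Spec_get_context_action get_context_action get_context_action_alt
  rw [(pvMain dialog).1 [] [], pvMerge_nil]
  rfl

@[simp]
theorem get_context_action_raises : Claim_raises_get_context_action := by
  unfold Claim_raises_get_context_action
  refine ⟨fun d _ h hp => hp h, by decide, by decide, ?_⟩
  show pvBGo [""] = [([""], [])]
  rw [pvBGo_cons_ctx "" [] (by decide)]
  simp [pvBGo]
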